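-- pv_equiv track=rewrite | github.com/sarnau/Inside-The-Loxone-Miniserver | Code/LoxoneLink.py | RSHash
-- ===== SOURCE A (Python) =====
-- def RSHash(key):
--     # it seems a and b are switched by Loxone
--     a = 63689
--     hash = 0
--     for i in range(len(key)):
--         hash = hash * a + ord(key[i])
--         hash = hash & 0xFFFFFFFF
--         a = a * 378551
--     return hash
-- ===== SOURCE B (Python) =====
-- def RSHash(key):
--     # Weighted-sum formulation: precompute the per-position multipliers forward
--     # (kept 32-bit), then accumulate ord(c)*weight walking the string back-to-front,
--     # masking as we go; valid because masking is reduction mod 2^32, a ring hom.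
--     mults = []
--     a = 63689
--     for _ in key:
--         mults.append(a)
--         a = (a * 378551) & 0xFFFFFFFF
--     res = 0
--     w = 1
--     for c, m in zip(reversed(key), reversed(mults)):
--         res = (res + ord(c) * w) & 0xFFFFFFFF
--         w = (w * m) & 0xFFFFFFFF
--     return res
-- ===== Notes on version B (the rewrite author's own statement) =====
-- stated objective: faster
-- what changed: Replaces A's Horner loop (whose multiplier a grows as an unbounded bigint) with a reverse-order weighted sum: per-position multipliers are precomputed forward reduced mod 2^32, then ord(c)*weight is accumulated walking the string back-to-front with all state kept 32-bit.
import Mathlib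
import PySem

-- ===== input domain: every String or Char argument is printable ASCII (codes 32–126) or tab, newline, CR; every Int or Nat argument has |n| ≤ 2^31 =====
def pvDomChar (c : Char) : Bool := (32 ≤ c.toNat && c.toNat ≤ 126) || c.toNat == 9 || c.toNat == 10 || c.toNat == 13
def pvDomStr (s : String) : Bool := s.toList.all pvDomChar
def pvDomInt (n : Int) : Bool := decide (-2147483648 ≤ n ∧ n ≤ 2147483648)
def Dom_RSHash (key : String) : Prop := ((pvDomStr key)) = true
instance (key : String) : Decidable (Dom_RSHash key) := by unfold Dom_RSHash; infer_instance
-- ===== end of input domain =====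

-- B computes the same 32-bit RSHash as a reverse-order weighted sum with 32-bit-reduced
-- weights instead of A's Horner loop whose multiplier `a` grows without bound.

-- ===== PORT A =====
-- A masks the (nonnegative) hash each step: `h & 0xFFFFFFFF` = `h % 2^32`, exact here since h ≥ 0.
def RSHash (key : String) : Int :=
  (key.toList.foldl
    (fun (s : Int × Int) c =>
      (s.1 * 378551, (s.2 * s.1 + (c.toNat : Int)) % 4294967296))
    (63689, 0)).2

-- ===== PORT B =====
-- forward pass building the (masked) multiplier list; Source B's first loop.
-- Every `& 0xFFFFFFFF` in Source B acts on a nonnegative value, so it is `% 2^32` exactly.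
def rsMults : List Char → Int → List Int
  | [], _ => []
  | _ :: cs, a => a :: rsMults cs ((a * 378551) % 4294967296)

-- Source B's second loop: fold over zip(reversed(key), reversed(mults)), masking each step
def RSHash_alt (key : String) : Int :=
  ((key.toList.reverse.zip (rsMults key.toList 63689).reverse).foldl
    (fun (s : Int × Int) p =>
      ((s.1 + (p.1.toNat : Int) * s.2) % 4294967296, (s.2 * p.2) % 4294967296))
    (0, 1)).1

-- ===== PRECONDITION & SPEC =====
def Spec_RSHash (key : String) (out : Int) : Prop := out = RSHash_alt key
instance (key : String) (out : Int) : Decidable (Spec_RSHash key out) := by unfold Spec_RSHash; infer_instance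

-- ===== CLAIM (what is proved, stated in full; the proofs are below) =====
def Claim_equal_RSHash : Prop := ∀ (key : String), Dom_RSHash key → Spec_RSHash key (RSHash key)

-- ===== LEMMAS AND PROOFS =====

-- reference polynomial (unreduced): W = product of the multipliers, T = weighted char sum
def rsW : List Char → Int → Int
  | [], _ => 1
  | _ :: cs, a => a * rsW cs (a * 378551)

def rsT : List Char → Int → Int
  | [], _ => 0
  | c :: cs, a => (c.toNat : Int) * rsW cs (a * 378551) + rsT cs (a * 378551)

theorem rsMults_length (l : List Char) (a : Int) : (rsMults l a).length = l.length := by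
  induction l generalizing a with
  | nil => rfl
  | cons c cs ih => simp [rsMults, ih]

theorem zip_reverse_eq {α β : Type} (l : List α) (m : List β) (h : l.length = m.length) :
    l.reverse.zip m.reverse = (l.zip m).reverse := by
  induction l generalizing m with
  | nil => cases m with
    | nil => rfl
    | cons b m => simp at h
  | cons a l ih =>
    cases m with
    | nil => simp at h
    | cons b m =>
      simp only [List.reverse_cons]
      rw [List.zip_append (by simpa using h), ih m (by simpa using h)]
      simp

theorem mod_absorb (x y z : Int) :
    ((x % 4294967296) * y + z) % 4294967296 = (x * y + z) % 4294967296 := by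
  conv_lhs => rw [Int.add_emod, Int.mul_emod, Int.emod_emod_of_dvd x dvd_rfl]
  rw [← Int.mul_emod, ← Int.add_emod]

-- rsW/rsT only depend on the seed modulo 2^32
theorem rsWT_congr (l : List Char) {x y : Int} (h : Int.ModEq 4294967296 x y) :
    Int.ModEq 4294967296 (rsW l x) (rsW l y)
      ∧ Int.ModEq 4294967296 (rsT l x) (rsT l y) := by
  induction l generalizing x y with
  | nil => exact ⟨Int.ModEq.refl 1, Int.ModEq.refl 0⟩
  | cons c cs ih =>
    have h' : Int.ModEq 4294967296 (x * 378551) (y * 378551) := h.mul_right 378551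
    exact ⟨h.mul (ih h').1,
      ((Int.ModEq.refl (c.toNat : Int)).mul (ih h').1).add (ih h').2⟩

theorem afold_eq (l : List Char) (a h : Int) :
    (l.foldl
      (fun (s : Int × Int) c =>
        (s.1 * 378551, (s.2 * s.1 + (c.toNat : Int)) % 4294967296))
      (a, h % 4294967296)).2 = (h * rsW l a + rsT l a) % 4294967296 := by
  induction l generalizing a h with
  | nil => simp [rsW, rsT]
  | cons c cs ih =>
    simp only [List.foldl_cons, rsW, rsT]
    rw [mod_absorb, ih (a * 378551) (h * a + (c.toNat : Int))]
    ring_nf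

theorem bfold_eq (l : List Char) (a : Int) :
    ((l.zip (rsMults l a)).reverse.foldl
      (fun (s : Int × Int) p =>
        ((s.1 + (p.1.toNat : Int) * s.2) % 4294967296, (s.2 * p.2) % 4294967296))
      (0, 1)) = (rsT l a % 4294967296, rsW l a % 4294967296) := by
  induction l generalizing a with
  | nil => simp [rsT, rsW]
  | cons c cs ih =>
    simp only [rsMults, List.zip_cons_cons, List.reverse_cons, List.foldl_append,
      List.foldl_cons, List.foldl_nil, ih ((a * 378551) % 4294967296)]
    have hseed : Int.ModEq 4294967296 ((a * 378551) % 4294967296) (a * 378551) :=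
      Int.emod_emod_of_dvd _ dvd_rfl
    have hW := (rsWT_congr cs hseed).1
    have hT := (rsWT_congr cs hseed).2
    refine Prod.ext ?_ ?_
    · show (rsT cs ((a * 378551) % 4294967296) % 4294967296 +
        (c.toNat : Int) * (rsW cs ((a * 378551) % 4294967296) % 4294967296)) % 4294967296
        = rsT (c :: cs) a % 4294967296
      rw [hT, hW, Int.add_emod, Int.emod_emod_of_dvd _ dvd_rfl, Int.mul_emod,
        Int.emod_emod_of_dvd _ dvd_rfl, ← Int.mul_emod, ← Int.add_emod]
      simp only [rsT]; ring_nf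
    · show (rsW cs ((a * 378551) % 4294967296) % 4294967296 * a) % 4294967296
        = rsW (c :: cs) a % 4294967296
      rw [hW, Int.mul_emod, Int.emod_emod_of_dvd _ dvd_rfl, ← Int.mul_emod]
      simp only [rsW]; ring_nf

-- ===== VERDICT (by name: the statement is the Claim_ definition above) =====
theorem RSHash_spec : Claim_equal_RSHash := by
  intro key _
  unfold Spec_RSHash RSHash RSHash_alt
  rw [show ((63689 : Int), (0 : Int)) = (63689, (0 : Int) % 4294967296) from rfl,
    afold_eq, zip_reverse_eq _ _ (rsMults_length key.toList 63689).symm, bfold_eq]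
  simp
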